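-- pv_equiv track=rewrite | github.com/tien10/ctf-writeups | angstromCTF_2021_writeup/Infinity Gauntlet/solve_InfinityGauntlet.py | getMissedIndex
-- ===== SOURCE A (Python) =====
-- def getMissedIndex(dataStr, aArr):
-- 	res = 0
-- 	quesMarkPos = dataStr.find('?')
-- 	ind = []
-- 	ind.append(quesMarkPos)
-- 	for i in aArr:
-- 		ind.append(dataStr.find(i))
-- 	ind.sort()
-- 	for j in range(len(ind)):
-- 		if ind[j] == quesMarkPos:
-- 			return j + 1
-- ===== SOURCE B (Python) =====
-- def getMissedIndex(dataStr, aArr):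
--     quesMarkPos = dataStr.find('?')
--     count = 0
--     for i in aArr:
--         if dataStr.find(i) < quesMarkPos:
--             count += 1
--     return count + 1
-- ===== Notes on version B (the rewrite author's own statement) =====
-- stated objective: simpler
-- what changed: Replaces building, sorting and scanning an index list with a single counting pass: rank of '?' position = 1 + number of elements whose find-position is strictly smaller.
import Mathlib
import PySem

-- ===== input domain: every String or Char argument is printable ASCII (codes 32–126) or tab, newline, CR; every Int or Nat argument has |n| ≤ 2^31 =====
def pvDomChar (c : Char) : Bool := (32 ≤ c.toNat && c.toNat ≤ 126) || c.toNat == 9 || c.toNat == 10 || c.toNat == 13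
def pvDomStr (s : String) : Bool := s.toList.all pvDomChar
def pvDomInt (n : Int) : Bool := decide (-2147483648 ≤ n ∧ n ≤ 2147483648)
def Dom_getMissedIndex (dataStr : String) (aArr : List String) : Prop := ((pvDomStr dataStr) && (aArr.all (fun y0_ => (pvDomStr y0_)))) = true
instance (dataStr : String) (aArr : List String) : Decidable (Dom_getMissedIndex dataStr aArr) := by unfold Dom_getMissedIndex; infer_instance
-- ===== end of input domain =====

-- B replaces A's build/sort/scan of an index list by a single counting pass (objective: simpler).

-- ===== PORT A =====
-- the 'for j in range(len(ind)): if ind[j] == quesMarkPos: return j + 1' loop, scanning with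
-- the running index j; returns none if no element matches (unreachable: quesMarkPos ∈ ind,
-- so Python's implicit None return is never taken; the port uses .getD 0 for that dead branch)
def pvScanA : List Int → Int → Int → Option Int
  | [], _, _ => none
  | x :: xs, q, j => if x = q then some (j + 1) else pvScanA xs q (j + 1)

def getMissedIndex (dataStr : String) (aArr : List String) : Int :=
  let quesMarkPos := PySem.Str.find dataStr "?"
  let ind : List Int := quesMarkPos :: aArr.map (fun i => PySem.Str.find dataStr i)
  let sortedInd := PySem.List.sorted ind (fun x => x) false
  (pvScanA sortedInd quesMarkPos 0).getD 0

-- ===== PORT B =====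
def getMissedIndex_alt (dataStr : String) (aArr : List String) : Int :=
  let quesMarkPos := PySem.Str.find dataStr "?"
  (aArr.foldl (fun count i =>
    if PySem.Str.find dataStr i < quesMarkPos then count + 1 else count) 0) + 1

-- ===== PRECONDITION & SPEC =====
def Spec_getMissedIndex (dataStr : String) (aArr : List String) (out : Int) : Prop := out = getMissedIndex_alt dataStr aArr
instance (dataStr : String) (aArr : List String) (out : Int) : Decidable (Spec_getMissedIndex dataStr aArr out) := by unfold Spec_getMissedIndex; infer_instance

-- ===== CLAIM (what is proved, stated in full; the proofs are below) =====
def Claim_equal_getMissedIndex : Prop := ∀ (dataStr : String) (aArr : List String), Dom_getMissedIndex dataStr aArr → Spec_getMissedIndex dataStr aArr (getMissedIndex dataStr aArr)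

-- ===== LEMMAS AND PROOFS =====

-- on a ≤-sorted list containing q, A's scan finds the first q, whose index is the number of
-- elements strictly below q
lemma pvScanA_sorted (s : List Int) (q j : Int)
    (hs : s.Pairwise (· ≤ ·)) (hq : q ∈ s) :
    pvScanA s q j = some (j + (s.countP (fun x => decide (x < q)) : Int) + 1) := by
  induction s generalizing j with
  | nil => cases hq
  | cons x xs ih =>
    rw [List.pairwise_cons] at hs
    by_cases hx : x = q
    · subst hx
      have h0 : xs.countP (fun x_1 => decide (x_1 < x)) = 0 := by
        rw [List.countP_eq_zero]
        intro y hy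
        simp [not_lt.mpr (hs.1 y hy)]
      simp [pvScanA, h0]
    · have hqxs : q ∈ xs := by
        rcases List.mem_cons.mp hq with h | h
        · exact absurd h.symm hx
        · exact h
      have hlt : x < q := lt_of_le_of_ne (hs.1 q hqxs) hx
      rw [pvScanA, if_neg hx, ih (j + 1) hs.2 hqxs]
      have hc : (x :: xs).countP (fun y => decide (y < q))
          = xs.countP (fun y => decide (y < q)) + 1 := by
        rw [List.countP_cons, if_pos (by simp [hlt])]
      simp only [hc, Option.some.injEq]
      push_cast
      ring

-- B's fold counts the elements with find strictly below quesMarkPos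
lemma pvFoldB_count (dataStr : String) (q : Int) (aArr : List String) (c : Int) :
    aArr.foldl (fun count i =>
      if PySem.Str.find dataStr i < q then count + 1 else count) c
    = c + ((aArr.map (fun i => PySem.Str.find dataStr i)).countP
            (fun x => decide (x < q)) : Int) := by
  induction aArr generalizing c with
  | nil => simp
  | cons a as ih =>
    by_cases h : PySem.Str.find dataStr a < q
    · rw [List.foldl_cons, if_pos h, ih, List.map_cons, List.countP_cons,
        if_pos (by simpa using h)]
      push_cast
      ring
    · rw [List.foldl_cons, if_neg h, ih, List.map_cons, List.countP_cons,
        if_neg (by simpa using h)]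
      simp

-- ===== VERDICT (by name: the statement is the Claim_ definition above) =====
theorem getMissedIndex_spec : Claim_equal_getMissedIndex := by
  intro dataStr aArr _
  have key : ∀ (q : Int) (l : List Int),
      (pvScanA (PySem.List.sorted (q :: l) (fun x => x) false) q 0).getD 0
        = (l.countP (fun x => decide (x < q)) : Int) + 1 := by
    intro q l
    have hperm : (PySem.List.sorted (q :: l) (fun x => x) false).Perm (q :: l) :=
      PySem.List.sorted_perm (q :: l) (fun x => x) false
    have hpair : (PySem.List.sorted (q :: l) (fun x => x) false).Pairwise (· ≤ ·) := by
      simpa using PySem.List.sorted_pairwise (q :: l) (fun x => x)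
    have hqmem : q ∈ PySem.List.sorted (q :: l) (fun x => x) false := by
      rw [hperm.mem_iff]; exact List.mem_cons_self
    rw [pvScanA_sorted _ _ _ hpair hqmem, hperm.countP_eq]
    simp [List.countP_cons]
  show (pvScanA (PySem.List.sorted
        (PySem.Str.find dataStr "?" :: aArr.map (fun i => PySem.Str.find dataStr i))
        (fun x => x) false) (PySem.Str.find dataStr "?") 0).getD 0
      = aArr.foldl (fun count i =>
          if PySem.Str.find dataStr i < PySem.Str.find dataStr "?" then count + 1 else count) 0 + 1
  rw [key, pvFoldB_count dataStr (PySem.Str.find dataStr "?") aArr 0]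
  simp
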